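-- pv_equiv track=rewrite | github.com/henriquetorrescampos/grokking_algorithms | recursive/recursive.py | EvenNums
-- ===== SOURCE A (Python) =====
-- def EvenNums(num, even=None):
--     if even is None: # base case for start list
--         even = []
--     if num <= 0: # base case ending recursion
--         return even
--     if num % 2 == 0:
--         even.append(num)
--     return EvenNums(num - 1, even)
-- ===== SOURCE B (Python) =====
-- def EvenNums(num, even=None):
--     if even is None:
--         even = []
--     asc = []
--     i = 2
--     while i <= num:
--         asc.append(i)
--         i += 2
--     even.extend(reversed(asc))
--     return even
-- ===== Notes on version B (the rewrite author's own statement) =====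
-- stated objective: alternative
-- what changed: Replaces the per-number descending recursion (one call and one parity test per integer from num down to 1) with an iterative ascending walk 2, 4, ... that visits only the even numbers and is reversed once at the end; Pre_ excludes num >= 997, where A's one-call-per-unit recursion exceeds CPython's default recursion limit and raises RecursionError.
import Mathlib
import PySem

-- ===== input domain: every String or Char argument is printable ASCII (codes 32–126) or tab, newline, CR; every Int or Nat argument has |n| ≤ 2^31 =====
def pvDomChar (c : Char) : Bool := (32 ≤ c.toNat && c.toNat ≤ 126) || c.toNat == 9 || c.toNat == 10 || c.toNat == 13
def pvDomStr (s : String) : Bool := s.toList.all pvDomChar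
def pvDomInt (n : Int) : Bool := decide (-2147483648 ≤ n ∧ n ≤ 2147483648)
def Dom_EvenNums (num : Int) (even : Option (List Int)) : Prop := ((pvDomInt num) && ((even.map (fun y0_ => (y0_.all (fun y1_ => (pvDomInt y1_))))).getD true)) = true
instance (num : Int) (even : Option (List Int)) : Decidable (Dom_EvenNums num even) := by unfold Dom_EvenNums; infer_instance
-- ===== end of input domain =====

-- B walks the even numbers 2,4,… upward iteratively and reverses once, instead of A's
-- per-integer descending recursion; both mutate a caller-supplied list the same way
-- (A appends, B extends), and equivalence is about the return value.
-- ===== PORT A =====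
def EvenNums (num : Int) (even : Option (List Int)) : List Int :=
  let ev := even.getD []
  if _h : num ≤ 0 then ev
  else
    let ev' := if PySem.Int.mod num 2 = 0 then ev ++ [num] else ev
    EvenNums (num - 1) (some ev')
termination_by num.toNat
decreasing_by omega

-- ===== PORT B =====
-- the while loop of Source B: asc collects 2,4,… up to num (i is the loop counter)
def ascEvens (i num : Int) : List Int :=
  if _h : i ≤ num then i :: ascEvens (i + 2) num else []
termination_by (num + 2 - i).toNat
decreasing_by omega

def EvenNums_alt (num : Int) (even : Option (List Int)) : List Int :=
  let ev := even.getD []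
  let asc := ascEvens 2 num
  ev ++ asc.reverse

-- ===== PRECONDITION & SPEC =====
-- A recurses once per unit of num, so under CPython's default recursion limit the Python A
-- raises RecursionError for num >= 997; Pre_ excludes those inputs (under a raised recursion limit
-- A still returns on some of them, with the same value as B).
def Pre_EvenNums (num : Int) (even : Option (List Int)) : Prop := num ≤ 996
instance (num : Int) (even : Option (List Int)) : Decidable (Pre_EvenNums num even) := by unfold Pre_EvenNums; infer_instance
def pvWitness_EvenNums : Int × Option (List Int) := (10, some [7])
def Spec_EvenNums (num : Int) (even : Option (List Int)) (out : List Int) : Prop := out = EvenNums_alt num even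
instance (num : Int) (even : Option (List Int)) (out : List Int) : Decidable (Spec_EvenNums num even out) := by unfold Spec_EvenNums; infer_instance

-- ===== CLAIM (what is proved, stated in full; the proofs are below) =====
def Claim_equal_EvenNums : Prop := ∀ (num : Int) (even : Option (List Int)), Dom_EvenNums num even → Pre_EvenNums num even → Spec_EvenNums num even (EvenNums num even)

-- ===== LEMMAS AND PROOFS =====

-- ===== VERDICT (by name: the statement is the Claim_ definition above) =====
-- ascEvens ignores an odd top bound
lemma ascEvens_odd_top : ∀ (n : Nat) (i num : Int), (num + 2 - i).toNat = n →
    (num - i) % 2 ≠ 0 → ascEvens i num = ascEvens i (num - 1) := by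
  intro n
  induction n using Nat.strong_induction_on with
  | _ n ih =>
    intro i num hn hpar
    by_cases hle : i ≤ num
    · rw [ascEvens, dif_pos hle]
      conv_rhs => rw [ascEvens, dif_pos (by omega : i ≤ num - 1)]
      rw [ih (num + 2 - (i + 2)).toNat (by omega) (i + 2) num rfl (by omega)]
    · rw [ascEvens, dif_neg hle]
      rw [ascEvens, dif_neg (by omega : ¬ i ≤ num - 1)]

-- when the top bound matches the walk's parity, it is the last element
lemma ascEvens_even_top : ∀ (n : Nat) (i num : Int), (num + 2 - i).toNat = n →
    i ≤ num → (num - i) % 2 = 0 →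
    ascEvens i num = ascEvens i (num - 2) ++ [num] := by
  intro n
  induction n using Nat.strong_induction_on with
  | _ n ih =>
    intro i num hn hle hpar
    rw [ascEvens, dif_pos hle]
    by_cases h2 : i ≤ num - 2
    · rw [ih (num + 2 - (i + 2)).toNat (by omega) (i + 2) num rfl (by omega) (by omega)]
      conv_rhs => rw [ascEvens, dif_pos h2]
      simp
    · have hi : i = num := by omega
      rw [ascEvens, dif_neg (by omega : ¬ i + 2 ≤ num)]
      rw [ascEvens, dif_neg (by omega : ¬ i ≤ num - 2)]
      simp [hi]

lemma EvenNums_eq_alt : ∀ (n : Nat) (num : Int) (ev : List Int),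
    num.toNat = n → EvenNums num (some ev) = ev ++ (ascEvens 2 num).reverse := by
  intro n
  induction n with
  | zero =>
    intro num ev hn
    rw [EvenNums, dif_pos (by omega : num ≤ 0)]
    rw [ascEvens, dif_neg (by omega)]
    simp
  | succ m ih =>
    intro num ev hn
    have hpos : 0 < num := by omega
    have hmod : PySem.Int.mod num 2 = num % 2 :=
      PySem.Int.mod_eq_emod_of_pos (by omega)
    rw [EvenNums, dif_neg (by omega : ¬ num ≤ 0)]
    simp only [hmod, Option.getD_some]
    by_cases he : num % 2 = 0
    · rw [if_pos he, ih (num - 1) _ (by omega)]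
      have h2 : 2 ≤ num := by omega
      rw [ascEvens_even_top (num + 2 - 2).toNat 2 num rfl h2 (by omega)]
      rw [ascEvens_odd_top (num - 1 + 2 - 2).toNat 2 (num - 1) rfl (by omega)]
      simp [show num - 1 - 1 = num - 2 from by ring]
    · rw [if_neg he, ih (num - 1) _ (by omega)]
      rw [ascEvens_odd_top (num + 2 - 2).toNat 2 num rfl (by omega)]

-- even=None and even=[] start from the same empty list
lemma EvenNums_none_eq : ∀ (num : Int), EvenNums num none = EvenNums num (some []) := by
  intro num
  rw [EvenNums]
  conv_rhs => rw [EvenNums]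
  simp

theorem EvenNums_spec : Claim_equal_EvenNums := by
  intro num even _ _
  unfold Spec_EvenNums EvenNums_alt
  cases even with
  | none =>
    rw [EvenNums_none_eq]
    simpa using EvenNums_eq_alt num.toNat num [] rfl
  | some ev =>
    simpa using EvenNums_eq_alt num.toNat num ev rfl
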